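-- pv_equiv track=rewrite | github.com/Godo78/Projet-Programmation | swap_puzzle/grid.py | liste_swap_possible
-- ===== SOURCE A (Python) =====
-- def is_swap_possible(M, cell1, cell2):
--
--     x1,y1 = cell1
--     x2,y2 = cell2
--     if x1 < 0 or y1 < 0  or x2 < 0 or y2 < 0:
--         return False
--     if x1 >= len(M) or y1 >= len(M[0]) or x2 >= len(M) or y2 >= len(M[0]):
--         return False
--     if abs(x1-x2)+abs(y1-y2)>1:
--         return False
--     return True
--
-- def liste_swap_possible(M, cell):
--     L=[]
--     for i in range(len(M)):
--         for j in range(len(M[0])):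
--             if cell !=(i,j):
--                 if is_swap_possible(M, cell, (i,j)):
--                     L.append((cell,(i,j)))
--     return L
-- ===== SOURCE B (Python) =====
-- def liste_swap_possible(M, cell):
--     if not M:
--         return []
--     n, m = len(M), len(M[0])
--     x, y = cell
--     if not (0 <= x < n and 0 <= y < m):
--         return []
--     return [(cell, nb)
--             for nb in ((x - 1, y), (x, y - 1), (x, y + 1), (x + 1, y))
--             if 0 <= nb[0] < n and 0 <= nb[1] < m]
-- ===== Notes on version B (the rewrite author's own statement) =====
-- stated objective: faster
-- what changed: Instead of scanning every cell of the grid and testing adjacency against the given cell, B directly emits the at-most-4 orthogonal neighbours (up, left, right, down - row-major order) with constant-time bounds checks.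
import Mathlib
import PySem

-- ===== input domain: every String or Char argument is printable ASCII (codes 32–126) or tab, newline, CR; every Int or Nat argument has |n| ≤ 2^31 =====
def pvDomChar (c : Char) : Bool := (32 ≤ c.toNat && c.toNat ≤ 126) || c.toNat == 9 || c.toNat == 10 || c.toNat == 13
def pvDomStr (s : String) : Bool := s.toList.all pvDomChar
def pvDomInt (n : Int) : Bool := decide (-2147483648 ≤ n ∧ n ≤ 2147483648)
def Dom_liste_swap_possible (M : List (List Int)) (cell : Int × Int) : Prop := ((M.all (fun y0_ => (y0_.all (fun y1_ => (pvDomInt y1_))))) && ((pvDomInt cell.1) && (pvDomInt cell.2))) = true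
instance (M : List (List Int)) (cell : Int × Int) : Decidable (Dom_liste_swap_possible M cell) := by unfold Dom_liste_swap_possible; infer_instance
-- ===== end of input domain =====

-- B replaces A's O(n*m) scan of every grid cell by directly emitting the ≤ 4 orthogonal
-- neighbours with bounds checks, in A's row-major order (objective: faster).

-- ===== PORT A =====
-- M[0] is ported as M.headD []: in A it is only evaluated when len(M) > 0, where headD is exact.
def is_swap_possible (M : List (List Int)) (cell1 cell2 : Int × Int) : Bool :=
  let x1 := cell1.1; let y1 := cell1.2
  let x2 := cell2.1; let y2 := cell2.2
  if x1 < 0 ∨ y1 < 0 ∨ x2 < 0 ∨ y2 < 0 then false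
  else if x1 ≥ (M.length : Int) ∨ y1 ≥ ((M.headD []).length : Int) ∨
          x2 ≥ (M.length : Int) ∨ y2 ≥ ((M.headD []).length : Int) then false
  else if |x1 - x2| + |y1 - y2| > 1 then false
  else true

def liste_swap_possible (M : List (List Int)) (cell : Int × Int) : List ((Int × Int) × (Int × Int)) :=
  (PySem.List.pyRange 0 (M.length : Int) 1).foldl (fun L i =>
    (PySem.List.pyRange 0 ((M.headD []).length : Int) 1).foldl (fun L j =>
      if cell ≠ (i, j) then
        if is_swap_possible M cell (i, j) then L ++ [(cell, (i, j))] else L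
      else L) L) []

-- ===== PORT B =====
def liste_swap_possible_alt (M : List (List Int)) (cell : Int × Int) : List ((Int × Int) × (Int × Int)) :=
  if M.length = 0 then []
  else
    let n : Int := M.length
    let m : Int := (M.headD []).length
    let x := cell.1; let y := cell.2
    if ¬ (0 ≤ x ∧ x < n ∧ 0 ≤ y ∧ y < m) then []
    else
      ([(x - 1, y), (x, y - 1), (x, y + 1), (x + 1, y)].filter
        (fun nb => decide (0 ≤ nb.1 ∧ nb.1 < n ∧ 0 ≤ nb.2 ∧ nb.2 < m))).map
        (fun nb => (cell, nb))

-- ===== PRECONDITION & SPEC =====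
def Spec_liste_swap_possible (M : List (List Int)) (cell : Int × Int) (out : List ((Int × Int) × (Int × Int))) : Prop := out = liste_swap_possible_alt M cell
instance (M : List (List Int)) (cell : Int × Int) (out : List ((Int × Int) × (Int × Int))) : Decidable (Spec_liste_swap_possible M cell out) := by unfold Spec_liste_swap_possible; infer_instance

-- ===== CLAIM (what is proved, stated in full; the proofs are below) =====
def Claim_equal_liste_swap_possible : Prop := ∀ (M : List (List Int)) (cell : Int × Int), Dom_liste_swap_possible M cell → Spec_liste_swap_possible M cell (liste_swap_possible M cell)

-- ===== LEMMAS AND PROOFS =====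

-- pred for row i
def pvPred (M : List (List Int)) (x y i j : Int) : Bool :=
  decide ((x, y) ≠ (i, j)) && is_swap_possible M (x, y) (i, j)

def pvRow (M : List (List Int)) (x y i : Int) : List ((Int × Int) × (Int × Int)) :=
  ((PySem.List.pyRange 0 ((M.headD []).length : Int) 1).filter (pvPred M x y i)).map
    (fun j => ((x, y), (i, j)))

lemma pred_eq (M : List (List Int)) (x y i j : Int) :
    pvPred M x y i j =
    decide (¬(x = i ∧ y = j) ∧ 0 ≤ x ∧ 0 ≤ y ∧ 0 ≤ i ∧ 0 ≤ j ∧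
      x < (M.length : Int) ∧ y < ((M.headD []).length : Int) ∧
      i < (M.length : Int) ∧ j < ((M.headD []).length : Int) ∧
      (x - i).natAbs + (y - j).natAbs ≤ 1) := by
  unfold pvPred is_swap_possible
  simp only [Int.abs_eq_natAbs]
  split_ifs with h1 h2 h3
  · rw [Bool.and_false]; symm; rw [decide_eq_false_iff_not]; omega
  · rw [Bool.and_false]; symm; rw [decide_eq_false_iff_not]; omega
  · rw [Bool.and_false]; symm; rw [decide_eq_false_iff_not]; omega
  · rw [Bool.and_true, decide_eq_decide]; simp only [ne_eq, Prod.mk.injEq]; omega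

lemma A_flat (M : List (List Int)) (x y : Int) :
    liste_swap_possible M (x, y) =
      (PySem.List.pyRange 0 (M.length : Int) 1).flatMap (pvRow M x y) := by
  unfold liste_swap_possible
  rw [PySem.List.foldl_congr_mem _ _ (fun L i => L ++ pvRow M x y i) _ ?hcong]
  case hcong =>
    intro L i hi
    rw [show (fun (L : List ((Int × Int) × (Int × Int))) (j : Int) =>
          if (x, y) ≠ (i, j) then
            if is_swap_possible M (x, y) (i, j) = true then L ++ [((x, y), (i, j))] else L
          else L)
        = (fun L j => if pvPred M x y i j then L ++ [((x, y), (i, j))] else L) from ?_]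
    · exact PySem.List.foldl_append_if (pvPred M x y i) (fun j => ((x, y), (i, j))) _ _
    · funext L j
      by_cases h1 : (x, y) ≠ (i, j) <;> by_cases h2 : is_swap_possible M (x, y) (i, j) <;>
        simp [pvPred, h1, h2]
  exact PySem.List.foldl_append_eq_flatMap (pvRow M x y) _ []

lemma filt_single (a b t : Int) (p : Int → Bool)
    (h : ∀ j ∈ PySem.List.pyRange a b 1, p j = decide (j = t)) :
    (PySem.List.pyRange a b 1).filter p = if a ≤ t ∧ t < b then [t] else [] := by
  rw [List.filter_congr h]
  have e : (fun j : Int => decide (j = t)) = (fun j => j == t) := by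
    funext j; exact (Bool.beq_eq_decide_eq j t).symm
  rw [e, List.filter_beq]
  by_cases ht : a ≤ t ∧ t < b
  · rw [if_pos ht, List.count_eq_one_of_mem (PySem.List.nodup_pyRange_one a b)
      (PySem.List.mem_pyRange_one.mpr ht)]
    rfl
  · rw [if_neg ht, List.count_eq_zero.mpr, List.replicate_zero]
    intro hmem
    exact ht (PySem.List.mem_pyRange_one.mp hmem)

lemma flat_split {α : Type} (a b t : Int) (h1 : a ≤ t) (h2 : t < b) (g : Int → List α) :
    (PySem.List.pyRange a b 1).flatMap g =
      (PySem.List.pyRange a t 1).flatMap g ++ g t ++ (PySem.List.pyRange (t + 1) b 1).flatMap g := by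
  rw [PySem.List.pyRange_one_append a t b h1 (le_of_lt h2), PySem.List.pyRange_one_cons h2,
    List.flatMap_append, List.flatMap_cons, List.append_assoc]

-- rows at distance ≥ 2 from x (or out of column reach) contribute nothing
lemma row_nil (M : List (List Int)) (x y i : Int) (h : i < x - 1 ∨ x + 1 < i) :
    pvRow M x y i = [] := by
  unfold pvRow
  rw [List.filter_eq_nil_iff.mpr, List.map_nil]
  intro j hj
  rw [pred_eq]
  simp only [decide_eq_true_eq]
  omega

-- rows x-1 and x+1 contribute exactly column y (under in-bounds cell)
lemma row_side (M : List (List Int)) (x y i : Int)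
    (hx : 0 ≤ x ∧ x < (M.length : Int)) (hy : 0 ≤ y ∧ y < ((M.headD []).length : Int))
    (hi : (i = x - 1 ∨ i = x + 1)) (hib : 0 ≤ i ∧ i < (M.length : Int)) :
    pvRow M x y i = [((x, y), (i, y))] := by
  unfold pvRow
  rw [filt_single 0 ((M.headD []).length : Int) y _ ?hp, if_pos ⟨hy.1, hy.2⟩, List.map_cons, List.map_nil]
  case hp =>
    intro j hj
    have := PySem.List.mem_pyRange_one.mp hj
    rw [pred_eq, decide_eq_decide]
    omega

lemma row_mid (M : List (List Int)) (x y : Int)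
    (hx : 0 ≤ x ∧ x < (M.length : Int)) (hy : 0 ≤ y ∧ y < ((M.headD []).length : Int)) :
    pvRow M x y x =
      (if 0 ≤ y - 1 then [((x, y), (x, y - 1))] else []) ++
      (if y + 1 < ((M.headD []).length : Int) then [((x, y), (x, y + 1))] else []) := by
  unfold pvRow
  rw [PySem.List.pyRange_one_append 0 y ((M.headD []).length : Int) hy.1 (le_of_lt hy.2),
    List.filter_append, List.map_append]
  rw [filt_single 0 y (y - 1) _ ?hl, filt_single y ((M.headD []).length : Int) (y + 1) _ ?hr]
  case hl =>
    intro j hj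
    have := PySem.List.mem_pyRange_one.mp hj
    rw [pred_eq, decide_eq_decide]
    omega
  case hr =>
    intro j hj
    have := PySem.List.mem_pyRange_one.mp hj
    rw [pred_eq, decide_eq_decide]
    omega
  rw [apply_ite (List.map (fun j => ((x, y), (x, j)))),
    apply_ite (List.map (fun j => ((x, y), (x, j))))]
  congr 1
  · exact if_congr (by omega) (by simp) rfl
  · exact if_congr (by omega) (by simp) rfl

lemma main_eq (M : List (List Int)) (cell : Int × Int) :
    liste_swap_possible M cell = liste_swap_possible_alt M cell := by
  obtain ⟨x, y⟩ := cell
  rw [A_flat]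
  by_cases hin : 0 ≤ x ∧ x < (M.length : Int) ∧ 0 ≤ y ∧ y < ((M.headD []).length : Int)
  · obtain ⟨hx0, hxn, hy0, hym⟩ := hin
    rw [flat_split 0 (M.length : Int) x hx0 hxn]
    have hleft : (PySem.List.pyRange 0 x 1).flatMap (pvRow M x y)
        = if 0 ≤ x - 1 then [((x, y), (x - 1, y))] else [] := by
      by_cases h : 0 ≤ x - 1
      · rw [if_pos h, flat_split 0 x (x - 1) (by omega) (by omega),
          List.flatMap_eq_nil_iff.mpr (fun i hi => row_nil M x y i (by
            have := PySem.List.mem_pyRange_one.mp hi; omega)),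
          PySem.List.pyRange_one_eq_nil (by omega : (x:Int) ≤ x - 1 + 1), List.flatMap_nil,
          row_side M x y (x - 1) ⟨hx0, hxn⟩ ⟨hy0, hym⟩ (Or.inl rfl) ⟨by omega, by omega⟩]
        simp
      · rw [if_neg h, PySem.List.pyRange_one_eq_nil (by omega), List.flatMap_nil]
    have hright : (PySem.List.pyRange (x + 1) (M.length : Int) 1).flatMap (pvRow M x y)
        = if x + 1 < (M.length : Int) then [((x, y), (x + 1, y))] else [] := by
      by_cases h : x + 1 < (M.length : Int)
      · rw [if_pos h, PySem.List.pyRange_one_cons h, List.flatMap_cons,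
          row_side M x y (x + 1) ⟨hx0, hxn⟩ ⟨hy0, hym⟩ (Or.inr rfl) ⟨by omega, by omega⟩,
          List.flatMap_eq_nil_iff.mpr (fun i hi => row_nil M x y i (by
            have := PySem.List.mem_pyRange_one.mp hi; omega))]
        simp
      · rw [if_neg h, PySem.List.pyRange_one_eq_nil (by omega), List.flatMap_nil]
    rw [hleft, hright, row_mid M x y ⟨hx0, hxn⟩ ⟨hy0, hym⟩]
    have hB : liste_swap_possible_alt M (x, y) =
        (if 0 ≤ x - 1 then [((x, y), (x - 1, y))] else []) ++
        ((if 0 ≤ y - 1 then [((x, y), (x, y - 1))] else []) ++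
         (if y + 1 < ((M.headD []).length : Int) then [((x, y), (x, y + 1))] else [])) ++
        (if x + 1 < (M.length : Int) then [((x, y), (x + 1, y))] else []) := by
      simp only [liste_swap_possible_alt]
      conv_lhs => rw [if_neg (show ¬ M.length = 0 by omega),
        if_neg (not_not_intro (show (0 ≤ x ∧ x < (M.length : Int) ∧ 0 ≤ y ∧ y < ((M.headD []).length : Int)) from ⟨hx0, hxn, hy0, hym⟩))]
      simp only [List.filter_cons, List.filter_nil]
      rw [show decide (0 ≤ x - 1 ∧ x - 1 < (M.length : Int) ∧ 0 ≤ y ∧ y < ((M.headD []).length : Int))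
            = decide (0 ≤ x - 1) from by rw [decide_eq_decide]; omega,
        show decide (0 ≤ x ∧ x < (M.length : Int) ∧ 0 ≤ y - 1 ∧ y - 1 < ((M.headD []).length : Int))
            = decide (0 ≤ y - 1) from by rw [decide_eq_decide]; omega,
        show decide (0 ≤ x ∧ x < (M.length : Int) ∧ 0 ≤ y + 1 ∧ y + 1 < ((M.headD []).length : Int))
            = decide (y + 1 < ((M.headD []).length : Int)) from by rw [decide_eq_decide]; omega,
        show decide (0 ≤ x + 1 ∧ x + 1 < (M.length : Int) ∧ 0 ≤ y ∧ y < ((M.headD []).length : Int))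
            = decide (x + 1 < (M.length : Int)) from by rw [decide_eq_decide]; omega]
      by_cases c1 : (1 : Int) ≤ x <;> by_cases c2 : (1 : Int) ≤ y <;>
        by_cases c3 : y + 1 < ((M.head?.getD []).length : Int) <;>
        by_cases c4 : x + 1 < (M.length : Int) <;>
        simp [c1, c2, c3, c4]
    rw [hB]
  · rw [List.flatMap_eq_nil_iff.mpr (fun i hi => by
      unfold pvRow
      rw [List.filter_eq_nil_iff.mpr, List.map_nil]
      intro j hj
      rw [pred_eq]
      simp only [decide_eq_true_eq]
      have := PySem.List.mem_pyRange_one.mp hj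
      omega)]
    simp only [liste_swap_possible_alt]
    split_ifs <;> rfl

-- ===== VERDICT (by name: the statement is the Claim_ definition above) =====
theorem liste_swap_possible_spec : Claim_equal_liste_swap_possible := by
  intro M cell _
  unfold Spec_liste_swap_possible
  exact main_eq M cell
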